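-- pv_equiv track=rewrite | github.com/mickgian/Vaelendor | hooks/personaggi-secondari-checker.py | get_narrative_text
-- ===== SOURCE A (Python) =====
-- def get_narrative_text(content):
--     """Estrae solo il testo narrativo, escludendo sezioni di analisi."""
--     markers = [
--         "## Fine Capitolo",
--         "## Strati Narrativi",
--         "## Elementi a Doppio Strato",
--         "## Momenti Chiave",
--         "## Geografia del Capitolo",
--         "## Cinque Scene Salienti",
--         "## Note sulla Versione",
--     ]
--     for marker in markers:
--         idx = content.find(marker)
--         if idx != -1:
--             content = content[:idx]
--     return content
-- ===== SOURCE B (Python) =====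
-- def get_narrative_text(content):
--     """Estrae solo il testo narrativo, escludendo sezioni di analisi."""
--     markers = [
--         "## Fine Capitolo",
--         "## Strati Narrativi",
--         "## Elementi a Doppio Strato",
--         "## Momenti Chiave",
--         "## Geografia del Capitolo",
--         "## Cinque Scene Salienti",
--         "## Note sulla Versione",
--     ]
--     finds = [content.find(m) for m in markers]
--     hits = [i for i in finds if i != -1]
--     cut = min(hits, default=len(content))
--     return content[:cut]
-- ===== Notes on version B (the rewrite author's own statement) =====
-- stated objective: simpler
-- what changed: B finds each marker once in the original string and slices once at the minimum hit index, instead of A's sequential truncate-and-rescan loop that repeatedly mutates content; equal because the markers cannot overlap an occurrence of one another.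
import Mathlib
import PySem

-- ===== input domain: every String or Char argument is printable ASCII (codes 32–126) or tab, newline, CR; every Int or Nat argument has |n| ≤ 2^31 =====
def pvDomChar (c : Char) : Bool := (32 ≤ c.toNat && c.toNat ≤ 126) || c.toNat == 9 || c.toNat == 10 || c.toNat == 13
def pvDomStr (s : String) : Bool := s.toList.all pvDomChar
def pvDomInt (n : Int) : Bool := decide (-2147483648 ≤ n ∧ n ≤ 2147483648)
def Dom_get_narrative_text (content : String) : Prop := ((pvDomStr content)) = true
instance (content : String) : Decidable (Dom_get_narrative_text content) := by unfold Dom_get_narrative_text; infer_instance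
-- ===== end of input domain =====

-- B replaces A's truncate-and-rescan loop by one find per marker in the original string and a
-- single slice at the minimum hit index (simpler; equal since the markers cannot overlap).

-- ===== PORT A =====
def pvMarkers : List String := [
  "## Fine Capitolo",
  "## Strati Narrativi",
  "## Elementi a Doppio Strato",
  "## Momenti Chiave",
  "## Geografia del Capitolo",
  "## Cinque Scene Salienti",
  "## Note sulla Versione"
]

def get_narrative_text (content : String) : String :=
  pvMarkers.foldl (fun c marker =>
    let idx := PySem.Str.find c marker
    if idx ≠ -1 then PySem.Str.slice c none (some idx) else c) content

-- ===== PORT B =====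
def get_narrative_text_alt (content : String) : String :=
  let finds := pvMarkers.map (fun m => PySem.Str.find content m)
  let hits := finds.filter (fun i => decide (i ≠ -1))
  let cut := PySem.List.minD hits (fun i => i) (PySem.Str.len content)
  PySem.Str.slice content none (some cut)

-- ===== PRECONDITION & SPEC =====
def Spec_get_narrative_text (content : String) (out : String) : Prop := out = get_narrative_text_alt content
instance (content : String) (out : String) : Decidable (Spec_get_narrative_text content out) := by unfold Spec_get_narrative_text; infer_instance

-- ===== CLAIM (what is proved, stated in full; the proofs are below) =====
def Claim_equal_get_narrative_text : Prop := ∀ (content : String), Dom_get_narrative_text content → Spec_get_narrative_text content (get_narrative_text content)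

-- ===== LEMMAS AND PROOFS =====

-- A's loop body, on the List Char side.
def pvStep (c m : List Char) : List Char :=
  if PySem.Chars.find c m ≠ -1 then PySem.List.slice c none (some (PySem.Chars.find c m)) else c

-- the cut index A's loop maintains, tracked against the ORIGINAL string c
def pvCut (c : List Char) (j : Nat) (m : List Char) : Nat :=
  if 0 ≤ PySem.Chars.find c m ∧ (PySem.Chars.find c m).toNat < j then (PySem.Chars.find c m).toNat else j

-- invariant: the current cut is the whole string or the start of an occurrence of some marker
def pvGood (M : List (List Char)) (c : List Char) (i : Nat) : Prop :=
  i = c.length ∨ ∃ t ∈ M, t <+: c.drop i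

def pvML : List (List Char) := pvMarkers.map String.toList

lemma pv_ml_ne_nil : ∀ s ∈ pvML, s ≠ [] := by decide

lemma pv_ml_len : ∀ s ∈ pvML, s.length ≤ 27 := by decide

set_option maxHeartbeats 1000000 in
lemma pv_noov_aux : ∀ s ∈ pvML, ∀ t ∈ pvML, ∀ d ∈ List.range 27, 1 ≤ d → d < s.length →
    ¬ s.drop d <+: t ∧ ¬ t <+: s.drop d := by decide

-- no marker straddles the start of an occurrence of another marker
lemma pv_noov : ∀ s ∈ pvML, ∀ t ∈ pvML, ∀ d, 1 ≤ d → d < s.length →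
    ¬ s.drop d <+: t ∧ ¬ t <+: s.drop d := by
  intro s hs t ht d h1 h2
  exact pv_noov_aux s hs t ht d (List.mem_range.mpr (lt_of_lt_of_le h2 (pv_ml_len s hs))) h1 h2

lemma pv_take_pre {s c : List Char} {i p : Nat} :
    s <+: (c.take i).drop p ↔ s <+: c.drop p ∧ s.length ≤ i - p := by
  rw [List.drop_take, List.prefix_take_iff]

-- an occurrence of a marker found strictly before a good cut lies entirely before it
lemma pv_span (M : List (List Char)) (c : List Char)
    (hov : ∀ s ∈ M, ∀ t ∈ M, ∀ d, 1 ≤ d → d < s.length → ¬ s.drop d <+: t ∧ ¬ t <+: s.drop d)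
    {i : Nat} (hi : i ≤ c.length) (hg : pvGood M c i) {s : List Char} (hs : s ∈ M)
    (hk0 : 0 ≤ PySem.Chars.find c s) (hki : (PySem.Chars.find c s).toNat < i) :
    (PySem.Chars.find c s).toNat + s.length ≤ i := by
  obtain ⟨hpre, -⟩ := PySem.Chars.find_spec hk0
  have hlen : (PySem.Chars.find c s).toNat + s.length ≤ c.length := by
    have h1 := hpre.length_le
    have h2 : (c.drop (PySem.Chars.find c s).toNat).length = c.length - (PySem.Chars.find c s).toNat :=
      List.length_drop
    omega
  rcases hg with h | ⟨t, htM, htp⟩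
  · omega
  · by_contra hcon
    push_neg at hcon
    have hd1 : 1 ≤ i - (PySem.Chars.find c s).toNat := by omega
    have hd2 : i - (PySem.Chars.find c s).toNat < s.length := by omega
    have h1 : s.drop (i - (PySem.Chars.find c s).toNat) <+: c.drop i := by
      have h := hpre.drop (i - (PySem.Chars.find c s).toNat)
      rwa [List.drop_drop, Nat.add_sub_cancel' (le_of_lt hki)] at h
    rcases List.prefix_or_prefix_of_prefix h1 htp with h2 | h2
    · exact (hov s hs t htM _ hd1 hd2).1 h2
    · exact (hov s hs t htM _ hd1 hd2).2 h2

-- one loop step of A, on the truncation of c at a good cut i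
lemma pv_step_take (M : List (List Char)) (c : List Char)
    (hne : ∀ s ∈ M, s ≠ [])
    (hov : ∀ s ∈ M, ∀ t ∈ M, ∀ d, 1 ≤ d → d < s.length → ¬ s.drop d <+: t ∧ ¬ t <+: s.drop d)
    {i : Nat} (hi : i ≤ c.length) (hg : pvGood M c i) {s : List Char} (hs : s ∈ M) :
    pvStep (c.take i) s = c.take (pvCut c i s) := by
  by_cases hQ : 0 ≤ PySem.Chars.find c s ∧ (PySem.Chars.find c s).toNat < i
  · obtain ⟨hk0, hki⟩ := hQ
    have hspan := pv_span M c hov hi hg hs hk0 hki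
    obtain ⟨hpre, hmin⟩ := PySem.Chars.find_spec hk0
    have hpre' : s <+: (c.take i).drop (PySem.Chars.find c s).toNat :=
      pv_take_pre.mpr ⟨hpre, by omega⟩
    have hk'0 : 0 ≤ PySem.Chars.find (c.take i) s := by
      rw [PySem.Chars.find_nonneg_iff]
      rw [← PySem.Chars.isIn_iff_infix, ← PySem.Chars.exists_prefix_drop_iff_isIn]
      exact ⟨_, hpre'⟩
    obtain ⟨hpre2, hmin2⟩ := PySem.Chars.find_spec hk'0
    have heq : (PySem.Chars.find (c.take i) s).toNat = (PySem.Chars.find c s).toNat := by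
      rcases lt_trichotomy (PySem.Chars.find (c.take i) s).toNat (PySem.Chars.find c s).toNat with h | h | h
      · exact absurd (pv_take_pre.mp hpre2).1 (hmin _ h)
      · exact h
      · exact absurd hpre' (hmin2 _ h)
    have hkeq : PySem.Chars.find (c.take i) s = PySem.Chars.find c s := by omega
    rw [pvStep, pvCut, hkeq, if_pos (by omega : PySem.Chars.find c s ≠ -1),
      if_pos ⟨hk0, hki⟩, PySem.List.slice_to _ hk0, List.take_take]
    congr 1
    omega
  · have hnotin : ¬ s <:+: c.take i := by
      intro hinf
      rw [← PySem.Chars.isIn_iff_infix, ← PySem.Chars.exists_prefix_drop_iff_isIn] at hinf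
      obtain ⟨j, hj⟩ := hinf
      obtain ⟨hj1, hj2⟩ := pv_take_pre.mp hj
      have hslen : 1 ≤ s.length := by
        have h := hne s hs
        cases s with
        | nil => exact absurd rfl h
        | cons a l => simp
      have h0 : 0 ≤ PySem.Chars.find c s := by
        rw [PySem.Chars.find_nonneg_iff]
        rw [← PySem.Chars.isIn_iff_infix, ← PySem.Chars.exists_prefix_drop_iff_isIn]
        exact ⟨j, hj1⟩
      obtain ⟨-, hmin⟩ := PySem.Chars.find_spec h0
      have hkj : (PySem.Chars.find c s).toNat ≤ j := by
        by_contra h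
        exact hmin j (by omega) hj1
      exact hQ ⟨h0, by omega⟩
    have hfneg : PySem.Chars.find (c.take i) s = -1 :=
      (PySem.Chars.find_eq_neg_one_iff _ _).mpr hnotin
    rw [pvStep, pvCut, hfneg, if_neg (by simp), if_neg hQ]

-- A's whole loop, started from a good cut, truncates at the fold of pvCut
lemma pv_fold' (M : List (List Char)) (c : List Char)
    (hne : ∀ s ∈ M, s ≠ [])
    (hov : ∀ s ∈ M, ∀ t ∈ M, ∀ d, 1 ≤ d → d < s.length → ¬ s.drop d <+: t ∧ ¬ t <+: s.drop d) :
    ∀ (ms : List (List Char)), (∀ s ∈ ms, s ∈ M) → ∀ (i : Nat), i ≤ c.length → pvGood M c i →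
      ms.foldl pvStep (c.take i) = c.take (ms.foldl (pvCut c) i) := by
  intro ms
  induction ms with
  | nil => intro _ i _ _; rfl
  | cons s ms ih =>
    intro hsub i hi hg
    simp only [List.foldl_cons]
    rw [pv_step_take M c hne hov hi hg (hsub s (by simp))]
    have hcle : pvCut c i s ≤ i := by rw [pvCut]; split <;> omega
    apply ih (fun x hx => hsub x (by simp [hx])) _ (le_trans hcle hi)
    rw [pvCut]
    split
    · next hQ => exact Or.inr ⟨s, hsub s (by simp), (PySem.Chars.find_spec hQ.1).1⟩
    · exact hg

-- A's String-level fold moved to the List Char side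
lemma pv_bridgeA (ms : List String) (x : String) :
    (ms.foldl (fun c marker =>
      let idx := PySem.Str.find c marker
      if idx ≠ -1 then PySem.Str.slice c none (some idx) else c) x).toList
    = (ms.map String.toList).foldl pvStep x.toList := by
  induction ms generalizing x with
  | nil => rfl
  | cons m ms ih =>
    simp only [List.foldl_cons, List.map_cons]
    rw [ih]
    congr 1
    simp only [pvStep, PySem.Str.find_eq]
    split
    · rw [PySem.Str.toList_slice, PySem.Chars.slice_eq_listSlice]
    · rfl

lemma pvA (content : String) :
    (get_narrative_text content).toList
    = content.toList.take (pvML.foldl (pvCut content.toList) content.toList.length) := by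
  unfold get_narrative_text
  rw [pv_bridgeA]
  have h := pv_fold' pvML content.toList pv_ml_ne_nil pv_noov pvML (fun s h => h)
    content.toList.length le_rfl (Or.inl rfl)
  rwa [List.take_length] at h

-- the fold of pvCut is the running minimum over the hit indices
lemma pv_cut_min (L : List Char) :
    ∀ (ms : List (List Char)) (j : Nat), j ≤ L.length →
      ((ms.foldl (pvCut L) j : Nat) : Int)
      = ((ms.map (fun m => PySem.Chars.find L m)).filter (fun i => decide (i ≠ -1))).foldl min (j : Int) := by
  intro ms
  induction ms with
  | nil => intro j _; rfl
  | cons s ms ih =>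
    intro j hj
    simp only [List.foldl_cons, List.map_cons, List.filter_cons]
    by_cases hk : PySem.Chars.find L s = -1
    · rw [if_neg (by simp [hk])]
      have hcut : pvCut L j s = j := by rw [pvCut, if_neg (by rw [hk]; omega)]
      rw [hcut]
      exact ih j hj
    · have hk0 : 0 ≤ PySem.Chars.find L s := by
        have := PySem.Chars.neg_one_le_find L s; omega
      rw [if_pos (by simp [hk])]
      simp only [List.foldl_cons]
      have hcle : pvCut L j s ≤ j := by rw [pvCut]; split <;> omega
      rw [ih (pvCut L j s) (le_trans hcle hj)]
      congr 1
      rw [pvCut]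
      split
      · next hQ =>
        rw [Int.toNat_of_nonneg hk0, min_eq_right]
        omega
      · next hQ =>
        rw [min_eq_left]
        omega

lemma pvB (content : String) :
    (get_narrative_text_alt content).toList
    = content.toList.take (pvML.foldl (pvCut content.toList) content.toList.length) := by
  unfold get_narrative_text_alt
  have hfinds : pvMarkers.map (fun m => PySem.Str.find content m)
      = pvML.map (fun m => PySem.Chars.find content.toList m) := by
    simp [pvML, List.map_map, PySem.Str.find_eq, Function.comp]
  simp only [hfinds, PySem.Str.len_eq]
  set L := content.toList
  set hits := ((pvML.map (fun m => PySem.Chars.find L m)).filter (fun i => decide (i ≠ -1))) with hhits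
  have hminD : PySem.List.minD hits (fun i => i) ((L.length : Int)) = hits.foldl min ((L.length : Int)) := by
    cases hH : hits with
    | nil => simp [PySem.List.minD, PySem.List.min?]
    | cons h t =>
      have hmem : h ∈ hits := by rw [hH]; simp
      have hhle : h ≤ (L.length : Int) := by
        rw [hhits] at hmem
        obtain ⟨m, hm, hfm⟩ := List.mem_filter.mp hmem |>.1 |> List.mem_map.mp
        rw [← hfm]
        exact PySem.Chars.find_le_length L m
      rw [PySem.List.minD, PySem.List.min?_id_cons, Option.getD_some, List.foldl_cons,
        min_eq_right hhle]
  rw [hminD, ← pv_cut_min L pvML L.length le_rfl, PySem.Str.toList_slice,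
    PySem.Chars.slice_eq_listSlice, PySem.List.slice_to_natCast]

-- ===== VERDICT (by name: the statement is the Claim_ definition above) =====
theorem get_narrative_text_spec : Claim_equal_get_narrative_text := by
  intro content _
  unfold Spec_get_narrative_text
  exact String.toList_inj.mp (by rw [pvA, pvB])
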